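-- pv_equiv track=rewrite | github.com/aleko2144/Hard-Truck-1-2-Blender-plugins | src/addons/b3d_tools/b3d/imghelp.py | get_argb_bit_mask
-- ===== SOURCE A (Python) =====
-- def get_argb_bit_mask(image_format):
--     offset = 0
--     bit_masks = []
--     for i in range(3, -1, -1):
--         cur_int = int(image_format[i])
--         if cur_int == 0:
--             format_int = 0
--         else:
--             format_int = 1
--             for j in range(cur_int-1):
--                 format_int = format_int << 1
--                 format_int += 1
--         format_int = format_int << offset
--         bit_masks.append(format_int)
--         offset += cur_int
--
--     return bit_masks[::-1] #reverse
-- ===== SOURCE B (Python) =====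
-- def get_argb_bit_mask(image_format):
--     widths = [int(image_format[i]) for i in range(4)]
--     return [((1 << widths[i]) - 1) << sum(widths[i + 1:]) for i in range(4)]
-- ===== Notes on version B (the rewrite author's own statement) =====
-- stated objective: simpler
-- what changed: Replaces the reverse-indexed loop with a running offset, the inner per-bit doubling loop and the final list reversal by a single forward comprehension using the closed-form mask (1<<w)-1 shifted by the sum of the higher-index widths.
-- outside the precondition, e.g. on get_argb_bit_mask([-1, 2, 0, 0]): A returns [4, 3, 0, 0], B raises ValueError
import Mathlib
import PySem

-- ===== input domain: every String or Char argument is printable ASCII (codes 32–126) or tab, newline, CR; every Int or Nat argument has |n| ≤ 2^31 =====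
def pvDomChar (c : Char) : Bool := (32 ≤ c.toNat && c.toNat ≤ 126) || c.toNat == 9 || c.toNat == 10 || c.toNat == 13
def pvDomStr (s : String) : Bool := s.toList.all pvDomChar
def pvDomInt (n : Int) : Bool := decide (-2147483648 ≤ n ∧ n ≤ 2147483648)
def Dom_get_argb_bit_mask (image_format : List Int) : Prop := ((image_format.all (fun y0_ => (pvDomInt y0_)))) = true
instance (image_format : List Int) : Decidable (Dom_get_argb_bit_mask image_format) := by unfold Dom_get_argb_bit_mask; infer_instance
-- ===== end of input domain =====

-- B replaces A's reverse loop with a running offset and inner bit-doubling loop by a single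
-- forward comprehension using the closed-form mask (1<<w)-1 shifted by the sum of the higher-index widths (objective: simpler).

-- ===== PORT A =====
-- inner loop 'format_int = 1; for j in range(cur_int-1): format_int <<= 1; format_int += 1' (exact for cur ≥ 0;
-- Python's range(cur-1) is empty for cur ≤ 0, matched by (cur-1).toNat = 0)
def pvInnerMask (cur : Int) : Int :=
  if cur = 0 then 0
  else (List.range (cur - 1).toNat).foldl (fun f _ => f * 2 + 1) 1

-- '<< offset' ported as * 2 ^ offset.toNat — exact whenever offset ≥ 0; Python raises ValueError on a
-- negative shift, those inputs are outside Pre_.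
def get_argb_bit_mask (image_format : List Int) : List Int :=
  let step : Int × List Int → Int → Int × List Int := fun st i =>
    let cur := PySem.List.pyGetD image_format i 0
    let format_int := pvInnerMask cur
    let format_int := format_int * 2 ^ st.1.toNat
    (st.1 + cur, st.2 ++ [format_int])
  ((PySem.List.pyRange 3 (-1) (-1)).foldl step (0, [])).2.reverse

-- ===== PORT B =====
def get_argb_bit_mask_alt (image_format : List Int) : List Int :=
  let widths := (List.range 4).map (fun i => PySem.List.pyGetD image_format (Int.ofNat i) 0)
  (List.range 4).map (fun i =>
    (2 ^ (widths.getD i 0).toNat - 1) * 2 ^ ((widths.drop (i + 1)).sum).toNat)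

-- ===== PRECONDITION & SPEC =====
-- Pre_ excludes lists shorter than 4 (A raises IndexError) and lists whose first four entries are not all
-- nonnegative: there A either raises ValueError on a negative shift or returns an artefact of the empty
-- range(cur-1) loop (mask 1 for a negative width), where B's natural (1<<w)-1 itself raises ValueError.
def Pre_get_argb_bit_mask (image_format : List Int) : Prop :=
  4 ≤ image_format.length ∧
  0 ≤ image_format.getD 0 0 ∧ 0 ≤ image_format.getD 1 0 ∧
  0 ≤ image_format.getD 2 0 ∧ 0 ≤ image_format.getD 3 0
instance (image_format : List Int) : Decidable (Pre_get_argb_bit_mask image_format) := by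
  unfold Pre_get_argb_bit_mask; infer_instance

def pvWitness_get_argb_bit_mask : List Int := [8, 8, 8, 8]

def Spec_get_argb_bit_mask (image_format : List Int) (out : List Int) : Prop := out = get_argb_bit_mask_alt image_format
instance (image_format : List Int) (out : List Int) : Decidable (Spec_get_argb_bit_mask image_format out) := by unfold Spec_get_argb_bit_mask; infer_instance

-- ===== CLAIM (what is proved, stated in full; the proofs are below) =====
def Claim_equal_get_argb_bit_mask : Prop := ∀ (image_format : List Int), Dom_get_argb_bit_mask image_format → Pre_get_argb_bit_mask image_format → Spec_get_argb_bit_mask image_format (get_argb_bit_mask image_format)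

-- ===== LEMMAS AND PROOFS =====

lemma pvFoldDouble (n : Nat) :
    (List.range n).foldl (fun f _ => f * 2 + 1) (1 : Int) = 2 ^ (n + 1) - 1 := by
  induction n with
  | zero => simp
  | succ k ih =>
      rw [List.range_succ, List.foldl_append, ih]
      simp [pow_succ]; ring

lemma pvInnerMask_eq (w : Int) (hw : 0 ≤ w) : pvInnerMask w = 2 ^ w.toNat - 1 := by
  unfold pvInnerMask
  by_cases h : w = 0
  · simp [h]
  · rw [if_neg h, pvFoldDouble, show (w - 1).toNat + 1 = w.toNat by omega]

-- ===== VERDICT (by name: the statement is the Claim_ definition above) =====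
theorem get_argb_bit_mask_spec : Claim_equal_get_argb_bit_mask := by
  intro l _ hpre
  obtain ⟨hlen, h0, h1, h2, h3⟩ := hpre
  rcases l with _ | ⟨a, _ | ⟨b, _ | ⟨c, _ | ⟨d, t⟩⟩⟩⟩ <;> simp at hlen
  simp only [List.getD, List.getElem?_cons_zero, List.getElem?_cons_succ, Option.getD_some] at h0 h1 h2 h3
  show _ = get_argb_bit_mask_alt _
  have hrange : PySem.List.pyRange 3 (-1) (-1) = [3, 2, 1, 0] := by decide
  have g0 : PySem.List.pyGetD (a :: b :: c :: d :: t) 0 0 = a := by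
    rw [show (0:Int) = ((0:Nat):Int) from rfl, PySem.List.pyGetD_natCast]; simp [List.getD]
  have g1 : PySem.List.pyGetD (a :: b :: c :: d :: t) 1 0 = b := by
    rw [show (1:Int) = ((1:Nat):Int) from rfl, PySem.List.pyGetD_natCast]; simp [List.getD]
  have g2 : PySem.List.pyGetD (a :: b :: c :: d :: t) 2 0 = c := by
    rw [show (2:Int) = ((2:Nat):Int) by norm_num, PySem.List.pyGetD_natCast]; simp [List.getD]
  have g3 : PySem.List.pyGetD (a :: b :: c :: d :: t) 3 0 = d := by
    rw [show (3:Int) = ((3:Nat):Int) by norm_num, PySem.List.pyGetD_natCast]; simp [List.getD]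
  unfold get_argb_bit_mask get_argb_bit_mask_alt
  rw [hrange]
  simp only [List.foldl, List.range, List.range.loop, List.map, Int.ofNat_eq_natCast,
    Nat.cast_ofNat, Nat.cast_zero, Nat.cast_one]
  rw [g0, g1, g2, g3]
  simp only [List.getD, List.getElem?_cons_zero, List.getElem?_cons_succ, Option.getD_some,
    List.reverse_cons, List.reverse_nil, List.nil_append, List.cons_append, List.drop, List.sum_cons,
    List.sum_nil]
  rw [pvInnerMask_eq a h0, pvInnerMask_eq b h1, pvInnerMask_eq c h2, pvInnerMask_eq d h3]
  have e1 : (0 : Int) + d + c + b = b + (c + (d + 0)) := by ring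
  have e2 : (0 : Int) + d + c = c + (d + 0) := by ring
  have e3 : (0 : Int) + d = d + 0 := by ring
  rw [e1, e2, e3]
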